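-- pv_equiv track=rewrite | github.com/zhanghaok/BERT-MRC-NER | load_data.py | get_ids
-- ===== SOURCE A (Python) =====
-- def get_ids(target,data):
--     # data表示一句话的真实的标签但是这些标签去除了B和I，只有类型
--     # target是目标的标签比如 LOC
--     #返回真是标签的位置索引1，其他位置为0
--     start_ids = [0]*len(data)
--     end_ids = [0]*len(data)
--     flag = 0
--     for ind, t in enumerate(data):
--         if not flag:
--             if t == target:
--                 start_ids[ind] = 1
--                 flag = 1
--         else:
--             if t != target:
--                 end_ids[ind-1] = 1
--                 flag = 0
--     if flag:
--         end_ids[ind] = 1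
--     return(start_ids,end_ids)
-- ===== SOURCE B (Python) =====
-- def get_ids(target, data):
--     # Stateless reformulation: mark run boundaries locally from neighbours.
--     m = [t == target for t in data]
--     start_ids = [int(c and not p) for c, p in zip(m, [False] + m[:-1])]
--     end_ids = [int(c and not n) for c, n in zip(m, m[1:] + [False])]
--     return (start_ids, end_ids)
-- ===== Notes on version B (the rewrite author's own statement) =====
-- stated objective: simpler
-- what changed: Replaces the flag state machine with in-place list writes and a post-loop patch by two stateless comprehensions that mark each position from its neighbours (start = target and previous not target, end = target and next not target).
import Mathlib
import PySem

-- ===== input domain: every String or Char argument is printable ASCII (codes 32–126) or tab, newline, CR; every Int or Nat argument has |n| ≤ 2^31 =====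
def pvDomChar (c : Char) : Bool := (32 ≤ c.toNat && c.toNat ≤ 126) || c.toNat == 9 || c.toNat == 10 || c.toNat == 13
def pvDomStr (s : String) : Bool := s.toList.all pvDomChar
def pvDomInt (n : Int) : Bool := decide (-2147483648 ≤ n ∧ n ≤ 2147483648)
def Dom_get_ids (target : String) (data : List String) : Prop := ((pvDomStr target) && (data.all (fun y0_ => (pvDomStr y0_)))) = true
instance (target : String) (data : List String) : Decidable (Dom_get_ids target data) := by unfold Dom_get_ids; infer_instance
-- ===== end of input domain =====

-- B replaces A's flag state machine and index writes by two stateless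
-- neighbour-comparison passes (simpler decomposition; same O(n) cost).


-- ===== PORT A =====
def getIdsStep (target : String) (acc : List Int × List Int × Bool) (it : Int × String) :
    List Int × List Int × Bool :=
  let sids := acc.1
  let eids := acc.2.1
  let flag := acc.2.2
  if !flag then
    if it.2 == target then (PySem.List.pySetD sids it.1 1, eids, true)
    else (sids, eids, flag)
  else
    if it.2 != target then (sids, PySem.List.pySetD eids (it.1 - 1) 1, false)
    else (sids, eids, flag)

-- port of A: the flag state machine, writing into two zero-filled lists, with the post-loop patch
def get_ids (target : String) (data : List String) : List Int × List Int :=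
  let start_ids := List.replicate data.length (0 : Int)
  let end_ids := List.replicate data.length (0 : Int)
  let st := (PySem.List.enumerate data).foldl (getIdsStep target) (start_ids, end_ids, false)
  if st.2.2 then (st.1, PySem.List.pySetD st.2.1 (Int.ofNat data.length - 1) 1)
  else (st.1, st.2.1)

-- ===== PORT B =====
-- port of B: stateless neighbour comparison via zips of the match mask with its shifts
def get_ids_alt (target : String) (data : List String) : List Int × List Int :=
  let m := data.map (fun t => t == target)
  let start_ids := (m.zip (false :: m.dropLast)).map (fun p => if p.1 && !p.2 then (1 : Int) else 0)
  let end_ids := (m.zip (m.drop 1 ++ [false])).map (fun p => if p.1 && !p.2 then (1 : Int) else 0)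
  (start_ids, end_ids)

-- ===== PRECONDITION & SPEC =====
def Spec_get_ids (target : String) (data : List String) (out : List Int × List Int) : Prop := out = get_ids_alt target data
instance (target : String) (data : List String) (out : List Int × List Int) : Decidable (Spec_get_ids target data out) := by unfold Spec_get_ids; infer_instance

-- ===== CLAIM (what is proved, stated in full; the proofs are below) =====
def Claim_equal_get_ids : Prop := ∀ (target : String) (data : List String), Dom_get_ids target data → Spec_get_ids target data (get_ids target data)

-- ===== LEMMAS AND PROOFS =====

-- start marks produced by A's scan, as a structural recursion on the remaining data
def soutF (target : String) : Bool → List String → List Int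
  | _, [] => []
  | flag, x :: rs => (if !flag && (x == target) then (1 : Int) else 0) :: soutF target (x == target) rs

-- end marks BEFORE the post-loop patch (a pending 0 closes an open run)
def eoutF (target : String) : Bool → List String → List Int
  | flag, [] => if flag then [(0 : Int)] else []
  | flag, x :: rs =>
      (if flag then [if x == target then (0 : Int) else 1] else []) ++
      (if x == target then eoutF target true rs else (0 : Int) :: eoutF target false rs)

-- end marks AFTER the post-loop patch (an open run's last position gets 1)
def efullF (target : String) : Bool → List String → List Int
  | flag, [] => if flag then [(1 : Int)] else []
  | flag, x :: rs =>
      (if flag then [if x == target then (0 : Int) else 1] else []) ++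
      (if x == target then efullF target true rs else (0 : Int) :: efullF target false rs)

-- the flag after A's loop
def ffF (target : String) : Bool → List String → Bool
  | flag, [] => flag
  | _, x :: rs => ffF target (x == target) rs

theorem length_eoutF (target : String) (flag : Bool) (l : List String) :
    (eoutF target flag l).length = l.length + (if flag then 1 else 0) := by
  induction l generalizing flag with
  | nil => cases flag <;> simp [eoutF]
  | cons x rs ih =>
      by_cases hx : x = target <;> cases flag <;>
        simp [eoutF, hx, ih] <;> omega

theorem eoutF_ne_nil_of_cons (target : String) (flag : Bool) (y : String) (t : List String) :
    eoutF target flag (y :: t) ≠ [] := by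
  intro hc
  have h := length_eoutF target flag (y :: t)
  rw [hc] at h
  simp at h
  omega

theorem set_at_len (l : List Int) (a b : Int) (L : List Int) :
    (l ++ a :: L).set l.length b = l ++ b :: L := by
  induction l with
  | nil => rfl
  | cons y t ih => simp [ih]

theorem set_last_eq_dropLast (l : List Int) (a : Int) (h : l ≠ []) :
    l.set (l.length - 1) a = l.dropLast ++ [a] := by
  induction l with
  | nil => exact absurd rfl h
  | cons y t ih =>
      cases t with
      | nil => rfl
      | cons z u =>
          have ih' := ih (by simp)
          simp only [List.length_cons, Nat.add_sub_cancel] at ih' ⊢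
          rw [show (y :: z :: u).set (u.length + 1) a = y :: (z :: u).set u.length a from rfl]
          rw [ih']
          simp

-- the invariant of A's foldl over enumerate
theorem eoutF_true_ne_nil (target : String) (rs : List String) :
    eoutF target true rs ≠ [] := by
  intro hc
  have h := length_eoutF target true rs
  rw [hc] at h
  simp at h

theorem dropLast_append_ne_nil {l1 l2 : List Int} (h : l2 ≠ []) :
    (l1 ++ l2).dropLast = l1 ++ l2.dropLast := by
  cases l2 with
  | nil => exact absurd rfl h
  | cons a t =>
      induction l1 with
      | nil => rfl
      | cons y u ihu =>
          simp only [List.cons_append]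
          rw [List.dropLast_cons_of_ne_nil (by simp), ihu]

theorem foldA (target : String) : ∀ (rest : List String) (flag : Bool) (Ps Pe : List Int),
    Ps.length = Pe.length + (if flag then 1 else 0) →
    (PySem.List.enumerate rest (Int.ofNat Ps.length)).foldl (getIdsStep target)
        (Ps ++ List.replicate rest.length 0,
         Pe ++ List.replicate ((if flag then 1 else 0) + rest.length) 0, flag)
      = (Ps ++ soutF target flag rest, Pe ++ eoutF target flag rest, ffF target flag rest) := by
  intro rest
  induction rest with
  | nil =>
      intro flag Ps Pe h
      cases flag <;> simp [PySem.List.enumerate_nil, soutF, eoutF, ffF]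
  | cons x rs ih =>
      intro flag Ps Pe h
      rw [PySem.List.enumerate_cons, List.foldl_cons]
      by_cases hx : x = target
      · have hxb : (x == target) = true := by simp [hx]
        cases flag with
        | false =>
            have h' : Ps.length = Pe.length := by simpa using h
            have hr := ih true (Ps ++ [(1 : Int)]) Pe (by simp [h'])
            simpa [getIdsStep, hxb, hx, Nat.one_add, List.replicate_succ, set_at_len,
              soutF, eoutF, ffF, Int.ofNat_eq_natCast, List.append_assoc] using hr
        | true =>
            have h' : Ps.length = Pe.length + 1 := by simpa using h
            have hr := ih true (Ps ++ [(0 : Int)]) (Pe ++ [(0 : Int)]) (by simp [h'])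
            simpa [getIdsStep, hxb, hx, Nat.one_add, List.replicate_succ, set_at_len,
              soutF, eoutF, ffF, Int.ofNat_eq_natCast, List.append_assoc] using hr
      · have hxb : (x == target) = false := by simp [hx]
        cases flag with
        | false =>
            have h' : Ps.length = Pe.length := by simpa using h
            have hr := ih false (Ps ++ [(0 : Int)]) (Pe ++ [(0 : Int)]) (by simp [h'])
            simpa [getIdsStep, hxb, hx, Nat.one_add, List.replicate_succ, set_at_len,
              soutF, eoutF, ffF, Int.ofNat_eq_natCast, List.append_assoc] using hr
        | true =>
            have h' : Ps.length = Pe.length + 1 := by simpa using h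
            have hidx : ((Ps.length : Int)) - 1 = ((Pe.length : Int)) := by omega
            have hr := ih false (Ps ++ [(0 : Int)]) (Pe ++ [(1 : Int), 0]) (by simp [h'])
            simpa [getIdsStep, hxb, hx, hidx, Nat.one_add, List.replicate_succ, set_at_len,
              soutF, eoutF, ffF, Int.ofNat_eq_natCast, List.append_assoc] using hr

-- the post-loop patch turns eoutF into efullF
theorem eout_efull (target : String) : ∀ (rest : List String) (flag : Bool),
    efullF target flag rest =
      if ffF target flag rest then (eoutF target flag rest).dropLast ++ [1]
      else eoutF target flag rest := by
  intro rest
  induction rest with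
  | nil => intro flag; cases flag <;> simp [efullF, eoutF, ffF]
  | cons x rs ih =>
      intro flag
      have hff : ffF target flag (x :: rs) = ffF target (x == target) rs := by
        cases flag <;> rfl
      have hE : eoutF target flag (x :: rs)
          = (if flag then [if x == target then (0 : Int) else 1] else []) ++
            (if x == target then eoutF target true rs else (0 : Int) :: eoutF target false rs) := by
        cases flag <;> rfl
      have hF : efullF target flag (x :: rs)
          = (if flag then [if x == target then (0 : Int) else 1] else []) ++
            (if x == target then efullF target true rs else (0 : Int) :: efullF target false rs) := by
        cases flag <;> rfl
      rw [hff, hE, hF]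
      by_cases hf : ffF target (x == target) rs = true
      · rw [if_pos hf]
        have htail_ne : (if x == target then eoutF target true rs
            else (0 : Int) :: eoutF target false rs) ≠ [] := by
          by_cases hx : x = target
          · have hxb : (x == target) = true := by simp [hx]
            simpa [hxb] using eoutF_true_ne_nil target rs
          · have hxb : (x == target) = false := by simp [hx]
            simp [hxb]
        rw [dropLast_append_ne_nil htail_ne, List.append_assoc]
        congr 1
        by_cases hx : x = target
        · have hxb : (x == target) = true := by simp [hx]
          have hf' : ffF target true rs = true := by rwa [hxb] at hf
          rw [if_pos hxb, if_pos hxb, ih true, if_pos hf']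
        · have hxb : (x == target) = false := by simp [hx]
          have hf' : ffF target false rs = true := by rwa [hxb] at hf
          cases rs with
          | nil => simp [ffF] at hf'
          | cons y t =>
              rw [if_neg (by simp [hxb]), if_neg (by simp [hxb])]
              rw [show ((0 : Int) :: eoutF target false (y :: t)).dropLast
                    = (0 : Int) :: (eoutF target false (y :: t)).dropLast from by
                  cases hEq : eoutF target false (y :: t) with
                  | nil => exact absurd hEq (eoutF_ne_nil_of_cons target false y t)
                  | cons a b => simp]
              rw [ih false, if_pos hf']
              simp
      · rw [if_neg hf]
        congr 1
        by_cases hx : x = target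
        · have hxb : (x == target) = true := by simp [hx]
          have hf' : ¬ ffF target true rs = true := by rwa [hxb] at hf
          rw [if_pos hxb, if_pos hxb, ih true, if_neg hf']
        · have hxb : (x == target) = false := by simp [hx]
          have hf' : ¬ ffF target false rs = true := by rwa [hxb] at hf
          rw [if_neg (by simp [hxb]), if_neg (by simp [hxb]), ih false, if_neg hf']

-- B's start pass equals soutF
theorem zip_dropLast_cons (b prev : Bool) (ms : List Bool) :
    List.zip (b :: ms) (prev :: (b :: ms).dropLast)
      = (b, prev) :: List.zip ms (b :: ms.dropLast) := by
  cases ms <;> simp [List.zip]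

theorem startB (target : String) : ∀ (data : List String) (prev : Bool),
    ((data.map (fun t => t == target)).zip
        (prev :: (data.map (fun t => t == target)).dropLast)).map
      (fun p => if p.1 && !p.2 then (1 : Int) else 0)
    = soutF target prev data := by
  intro data
  induction data with
  | nil => intro prev; simp [soutF]
  | cons x rs ih =>
      intro prev
      simp only [List.map_cons]
      rw [zip_dropLast_cons]
      simp only [List.map_cons, soutF]
      rw [ih (x == target)]
      congr 1
      by_cases hx : x = target <;> cases prev <;> simp [hx]

def headTgt (target : String) : List String → Bool
  | [] => false
  | x :: _ => x == target

def eB (target : String) (data : List String) : List Int :=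
  ((data.map (fun t => t == target)).zip
      ((data.map (fun t => t == target)).drop 1 ++ [false])).map
    (fun p => if p.1 && !p.2 then (1 : Int) else 0)

theorem eB_cons (target : String) (x : String) (rs : List String) :
    eB target (x :: rs)
      = (if (x == target) && !(headTgt target rs) then (1 : Int) else 0) :: eB target rs := by
  cases rs <;> simp [eB, headTgt, List.zip]

-- B's end pass equals efullF
theorem endB (target : String) : ∀ (data : List String) (flag : Bool),
    (if flag then [if headTgt target data then (0 : Int) else 1] else []) ++ eB target data
      = efullF target flag data := by
  intro data
  induction data with
  | nil => intro flag; cases flag <;> simp [eB, efullF, headTgt]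
  | cons x rs ih =>
      intro flag
      rw [eB_cons]
      have hpre : headTgt target (x :: rs) = (x == target) := rfl
      have hF : efullF target flag (x :: rs)
          = (if flag then [if x == target then (0 : Int) else 1] else []) ++
            (if x == target then efullF target true rs else (0 : Int) :: efullF target false rs) := by
        cases flag <;> rfl
      rw [hpre, hF]
      congr 1
      by_cases hx : x = target
      · have hxb : (x == target) = true := by simp [hx]
        rw [if_pos hxb]
        have ih1 := ih true
        rw [if_pos rfl] at ih1
        rw [← ih1]
        simp only [List.singleton_append]
        congr 1
        cases hh : headTgt target rs <;> simp [hxb]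
      · have hxb : (x == target) = false := by simp [hx]
        rw [if_neg (by simp [hxb])]
        have ih0 := ih false
        rw [if_neg (by simp)] at ih0
        rw [List.nil_append] at ih0
        rw [← ih0]
        simp [hxb]

theorem get_ids_eq (target : String) (data : List String) :
    get_ids target data = (soutF target false data, efullF target false data) := by
  have h0 := foldA target data false [] [] (by simp)
  norm_num at h0
  have hG : get_ids target data
      = (if (List.foldl (getIdsStep target)
              (List.replicate data.length 0, List.replicate data.length 0, false)
              (PySem.List.enumerate data)).2.2 = true
         then ((List.foldl (getIdsStep target)
                  (List.replicate data.length 0, List.replicate data.length 0, false)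
                  (PySem.List.enumerate data)).1,
               PySem.List.pySetD
                 (List.foldl (getIdsStep target)
                    (List.replicate data.length 0, List.replicate data.length 0, false)
                    (PySem.List.enumerate data)).2.1
                 (Int.ofNat data.length - 1) 1)
         else ((List.foldl (getIdsStep target)
                  (List.replicate data.length 0, List.replicate data.length 0, false)
                  (PySem.List.enumerate data)).1,
               (List.foldl (getIdsStep target)
                  (List.replicate data.length 0, List.replicate data.length 0, false)
                  (PySem.List.enumerate data)).2.1)) := rfl
  rw [hG, h0]
  by_cases hf : ffF target false data = true
  · rw [if_pos hf]
    have hne : eoutF target false data ≠ [] := by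
      cases data with
      | nil => simp [ffF] at hf
      | cons y t => exact eoutF_ne_nil_of_cons target false y t
    have hlen : (eoutF target false data).length = data.length := by
      simp [length_eoutF]
    have hpos : 1 ≤ data.length := by
      cases data with
      | nil => simp [ffF] at hf
      | cons y t => simp
    have hidx : (Int.ofNat data.length) - 1
        = ((((eoutF target false data).length - 1 : Nat)) : Int) := by
      rw [hlen, Int.ofNat_eq_natCast]
      omega
    rw [hidx, PySem.List.pySetD_natCast, set_last_eq_dropLast _ _ hne,
      eout_efull target data false, if_pos hf]
  · rw [if_neg hf, eout_efull target data false, if_neg hf]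

theorem get_ids_alt_eq (target : String) (data : List String) :
    get_ids_alt target data = (soutF target false data, efullF target false data) := by
  have hG : get_ids_alt target data
      = (((data.map (fun t => t == target)).zip
            (false :: (data.map (fun t => t == target)).dropLast)).map
          (fun p => if p.1 && !p.2 then (1 : Int) else 0),
         eB target data) := rfl
  rw [hG, startB target data false]
  have hend := endB target data false
  rw [if_neg (by simp)] at hend
  rw [List.nil_append] at hend
  rw [hend]

-- ===== VERDICT (by name: the statement is the Claim_ definition above) =====
theorem get_ids_spec : Claim_equal_get_ids := by
  intro target data _
  unfold Spec_get_ids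
  rw [get_ids_eq, get_ids_alt_eq]
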